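-- pv_equiv track=rewrite | github.com/posl/comment_recommendation | script/mod_gen/3_time/en/267_B/0.py | isSplit
-- ===== SOURCE A (Python) =====
-- def isSplit(S):
--     if S[0] == '0':
--         return 'No'
--     for i in range(1, 10):
--         if S[i] == '1':
--             for j in range(i+1, 10):
--                 if S[j] == '1':
--                     for k in range(i+1, j):
--                         if S[k] == '0':
--                             return 'Yes'
--     return 'No'
-- ===== SOURCE B (Python) =====
-- def isSplit(S):
--     if S[0] == '0':
--         return 'No'
--     bits = [S[i] for i in range(1, 10)]   # the nine positions after the leading bit of the ten-bit input
--     if '1' not in bits: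
--         return 'No'
--     p = bits.index('1')
--     q = len(bits) - 1 - bits[::-1].index('1')
--     return 'Yes' if '0' in bits[p + 1:q] else 'No'
-- ===== Notes on version B (the rewrite author's own statement) =====
-- stated objective: simpler
-- what changed: Replaces A's triple nested positional scan over indices 1..9 with reading the ten bits once and a first-'1'/last-'1' endpoint search plus a single check for a '0' strictly between the endpoints; Pre_ restricts to the ten-bit domain (plus '0'-led strings), excluding short inputs on which A's return-or-IndexError behaviour is an artefact of its reading order and on which B raises IndexError.
-- outside the precondition, e.g. on isSplit('11011'): A returns 'Yes', B raises IndexError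
import Mathlib
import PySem

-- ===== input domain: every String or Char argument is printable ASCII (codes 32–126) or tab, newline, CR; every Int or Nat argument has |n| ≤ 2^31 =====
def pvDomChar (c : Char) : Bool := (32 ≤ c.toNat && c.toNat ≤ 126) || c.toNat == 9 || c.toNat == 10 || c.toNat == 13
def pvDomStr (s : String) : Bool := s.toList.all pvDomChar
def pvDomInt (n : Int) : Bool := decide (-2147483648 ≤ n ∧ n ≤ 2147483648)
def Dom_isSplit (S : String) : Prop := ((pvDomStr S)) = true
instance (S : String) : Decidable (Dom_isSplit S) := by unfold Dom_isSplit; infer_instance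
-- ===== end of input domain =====

-- B reads the ten bits once and replaces A's triple nested positional scan with a
-- first-'1'/last-'1' endpoint search plus one between-scan (objective: simpler); Pre_ keeps the
-- ten-bit domain (and '0'-led strings) — outside it A's return-or-IndexError is an accident of
-- its reading order and B raises IndexError.

-- ===== PORT A =====
-- Loop results: err = IndexError propagated, ret s = early 'return s', fall = loop ran to its end.
inductive PvRes where
  | err  : PvRes
  | ret  : String → PvRes
  | fall : PvRes
deriving DecidableEq, Repr

-- 'for k in range(i+1, j): if S[k] == '0': return 'Yes''  (called with k = i+1)
def pvKLoop (l : List Char) (k j : Nat) : PvRes :=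
  if k < j then
    match l[k]? with
    | none => .err
    | some c => if c = '0' then .ret "Yes" else pvKLoop l (k + 1) j
  else .fall
termination_by j - k

-- 'for j in range(i+1, 10): if S[j] == '1': <k-loop>'  (called with j = i+1)
def pvJLoop (l : List Char) (i j : Nat) : PvRes :=
  if j < 10 then
    match l[j]? with
    | none => .err
    | some c =>
      if c = '1' then
        match pvKLoop l (i + 1) j with
        | .ret s => .ret s
        | .err => .err
        | .fall => pvJLoop l i (j + 1)
      else pvJLoop l i (j + 1)
  else .fall
termination_by 10 - j

-- 'for i in range(1, 10): if S[i] == '1': <j-loop>'  (called with i = 1)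
def pvILoop (l : List Char) (i : Nat) : PvRes :=
  if i < 10 then
    match l[i]? with
    | none => .err
    | some c =>
      if c = '1' then
        match pvJLoop l i (i + 1) with
        | .ret s => .ret s
        | .err => .err
        | .fall => pvILoop l (i + 1)
      else pvILoop l (i + 1)
  else .fall
termination_by 10 - i

def isSplit (S : String) : String :=
  match S.toList[0]? with                         -- S[0] (index 0 is never negative)
  | none => ""                                    -- IndexError: outside Pre_
  | some c =>
    if c = '0' then "No"
    else
      match pvILoop S.toList 1 with
      | .ret s => s
      | .err => ""                                -- IndexError inside the loops: outside Pre_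
      | .fall => "No"

-- ===== PORT B =====
-- '[S[i] for i in range(1, 10)]': each S[i] may raise IndexError (none); the comprehension is
-- sequenced left to right, exactly as Python evaluates it.
def pvBits (l : List Char) (ix : List Int) : Option (List Char) :=
  match ix with
  | [] => some []
  | i :: rest =>
    match PySem.List.pyGet? l i with
    | none => none
    | some c =>
      match pvBits l rest with
      | none => none
      | some cs => some (c :: cs)

def isSplit_alt (S : String) : String :=
  match S.toList[0]? with                                    -- S[0]
  | none => ""                                               -- IndexError: outside Pre_
  | some c =>
    if c = '0' then "No"
    else
      match pvBits S.toList (PySem.List.pyRange 1 10 1) with -- bits = [S[i] for i in range(1, 10)]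
      | none => ""                                           -- IndexError: outside Pre_
      | some bits =>
        if bits.contains '1' = false then "No"               -- if '1' not in bits
        else
          match PySem.List.index? bits '1' with              -- p = bits.index('1')
          | none => ""                                       -- unreachable: guarded by '1' in bits
          | some p =>
            match PySem.List.index? bits.reverse '1' with    -- bits[::-1].index('1'); [::-1] = reverse (PySem.List.slice?_none_none_neg_one)
            | none => ""                                     -- unreachable
            | some r =>
              let q : Nat := bits.length - 1 - r             -- q = len(bits) - 1 - …
              if (PySem.List.slice bits (some ((p : Int) + 1)) (some (q : Int))).contains '0'  -- '0' in bits[p+1:q]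
                then "Yes" else "No"

-- ===== PRECONDITION & SPEC =====
-- Pre_ keeps the function's real domain, ten-bit strings (plus the '0'-led strings A answers from
-- their first character alone): on shorter strings that do not start with '0', A reads the fixed
-- indices 1..9, so whether it returns 'Yes' or raises IndexError is an artefact of its reading
-- order, and B — which materialises all ten positions up front — raises IndexError on every one
-- of them.
def Pre_isSplit (S : String) : Prop :=
  S.toList ≠ [] ∧ (S.toList[0]? = some '0' ∨ 10 ≤ S.toList.length)

instance (S : String) : Decidable (Pre_isSplit S) := by unfold Pre_isSplit; infer_instance

def pvWitness_isSplit : String := "1010101010"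

def Spec_isSplit (S : String) (out : String) : Prop := out = isSplit_alt S
instance (S : String) (out : String) : Decidable (Spec_isSplit S out) := by unfold Spec_isSplit; infer_instance

-- ===== CLAIM (what is proved, stated in full; the proofs are below) =====
def Claim_equal_isSplit : Prop := ∀ (S : String), Dom_isSplit S → Pre_isSplit S → Spec_isSplit S (isSplit S)


-- ===== LEMMAS AND PROOFS =====

def KPred (l : List Char) (k j : Nat) : Prop := ∃ m, k ≤ m ∧ m < j ∧ l[m]? = some '0'

def JPred (l : List Char) (i j0 : Nat) : Prop :=
  ∃ j, j0 ≤ j ∧ j < 10 ∧ j < l.length ∧ l[j]? = some '1' ∧ ∃ m, i + 1 ≤ m ∧ m < j ∧ l[m]? = some '0'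

def IPred (l : List Char) (i0 : Nat) : Prop :=
  ∃ j, j < 10 ∧ j < l.length ∧ ∃ k, k < j ∧ ∃ i, i < k ∧ i0 ≤ i ∧
    l[i]? = some '1' ∧ l[k]? = some '0' ∧ l[j]? = some '1'

-- the 1…0…1 pattern strictly inside the first ten characters (all indices ≥ 1)
def Etrip (l : List Char) : Prop :=
  ∃ j, j < 10 ∧ j < l.length ∧ ∃ k, k < j ∧ ∃ i, i < k ∧ 1 ≤ i ∧
    l[i]? = some '1' ∧ l[k]? = some '0' ∧ l[j]? = some '1'

lemma etrip_eq_ipred (l : List Char) : Etrip l = IPred l 1 := rfl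

lemma kLoop_spec (l : List Char) (k j : Nat) (hj : j ≤ l.length) :
    (KPred l k j → pvKLoop l k j = .ret "Yes") ∧ (¬ KPred l k j → pvKLoop l k j = .fall) := by
  fun_induction pvKLoop l k j
  case case1 k hkj hnone =>
    rw [List.getElem?_eq_none_iff] at hnone; omega
  case case2 k hkj hk =>
    exact ⟨fun _ => rfl, fun hn => absurd ⟨k, le_refl _, hkj, hk⟩ hn⟩
  case case3 k hkj c hc hne ih =>
    have key : KPred l k j ↔ KPred l (k + 1) j := by
      constructor
      · rintro ⟨m, hm1, hm2, hm3⟩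
        refine ⟨m, ?_, hm2, hm3⟩
        rcases Nat.eq_or_lt_of_le hm1 with h | h
        · subst h; rw [hc] at hm3; exact absurd (Option.some.inj hm3) hne
        · omega
      · rintro ⟨m, hm1, hm2, hm3⟩; exact ⟨m, by omega, hm2, hm3⟩
    rw [key]; exact ih
  case case4 k hkj =>
    exact ⟨fun ⟨m, h1, h2, _⟩ => absurd (h1.trans_lt h2) hkj, fun _ => rfl⟩
lemma jLoop_spec (l : List Char) (i j : Nat) (hj : j ≤ l.length ∨ 10 ≤ l.length) :
    (JPred l i j → pvJLoop l i j = .ret "Yes") ∧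
      (¬ JPred l i j → 10 ≤ l.length → pvJLoop l i j = .fall) ∧
      (¬ JPred l i j → l.length < 10 → pvJLoop l i j = .err) := by
  fun_induction pvJLoop l i j
  case case1 j hj10 hnone =>
    rw [List.getElem?_eq_none_iff] at hnone
    refine ⟨?_, fun _ h10 => by omega, fun _ _ => rfl⟩
    rintro ⟨j', h1, h2, h3, _⟩; omega
  case case2 j hj10 s hk hl1 =>
    have hjlen : j < l.length := List.getElem?_eq_some_iff.mp hl1 |>.1
    by_cases hKP : KPred l (i + 1) j
    · have hs : PvRes.ret s = PvRes.ret "Yes" := by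
        rw [← hk]; exact (kLoop_spec l (i + 1) j (by omega)).1 hKP
      obtain ⟨m, hm1, hm2, hm3⟩ := hKP
      have hJ : JPred l i j := ⟨j, le_refl _, hj10, hjlen, hl1, m, hm1, hm2, hm3⟩
      exact ⟨fun _ => hs, fun hn => absurd hJ hn, fun hn => absurd hJ hn⟩
    · have := (kLoop_spec l (i + 1) j (by omega)).2 hKP
      rw [hk] at this; cases this
  case case3 j hj10 hk hl1 =>
    have hjlen : j < l.length := List.getElem?_eq_some_iff.mp hl1 |>.1
    by_cases hKP : KPred l (i + 1) j
    · have := (kLoop_spec l (i + 1) j (by omega)).1 hKP; rw [hk] at this; cases this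
    · have := (kLoop_spec l (i + 1) j (by omega)).2 hKP; rw [hk] at this; cases this
  case case4 j hj10 hk hl1 ih =>
    have hjlen : j < l.length := List.getElem?_eq_some_iff.mp hl1 |>.1
    have hnk : ¬ KPred l (i + 1) j := fun h => by
      have := (kLoop_spec l (i + 1) j (by omega)).1 h; rw [hk] at this; cases this
    have key : JPred l i j ↔ JPred l i (j + 1) := by
      constructor
      · rintro ⟨j', h1, h2, h3, h4, m, hm1, hm2, hm3⟩
        rcases Nat.eq_or_lt_of_le h1 with h | h
        · exact absurd ⟨m, hm1, by omega, hm3⟩ (h ▸ hnk)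
        · exact ⟨j', by omega, h2, h3, h4, m, hm1, hm2, hm3⟩
      · rintro ⟨j', h1, h2, h3, h4, hm⟩; exact ⟨j', by omega, h2, h3, h4, hm⟩
    rw [key]; exact ih (Or.inl (by omega))
  case case5 j hj10 c hlc hne ih =>
    have hjlen : j < l.length := List.getElem?_eq_some_iff.mp hlc |>.1
    have key : JPred l i j ↔ JPred l i (j + 1) := by
      constructor
      · rintro ⟨j', h1, h2, h3, h4, hm⟩
        rcases Nat.eq_or_lt_of_le h1 with h | h
        · subst h; rw [hlc] at h4; exact absurd (Option.some.inj h4) hne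
        · exact ⟨j', by omega, h2, h3, h4, hm⟩
      · rintro ⟨j', h1, h2, h3, h4, hm⟩; exact ⟨j', by omega, h2, h3, h4, hm⟩
    rw [key]; exact ih (Or.inl (by omega))
  case case6 j hj10 =>
    refine ⟨?_, fun _ _ => rfl, fun _ hlen => by omega⟩
    rintro ⟨j', h1, h2, _⟩; omega
lemma ipred_jpred (l : List Char) (i : Nat) (h : IPred l i) : JPred l i (i + 1) := by
  obtain ⟨j, h1, h2, k, h3, i', h4, h5, h6, h7, h8⟩ := h
  exact ⟨j, by omega, h1, h2, h8, k, by omega, h3, h7⟩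

lemma jpred_ipred (l : List Char) (i : Nat) (hi1 : l[i]? = some '1') (h : JPred l i (i + 1)) :
    IPred l i := by
  obtain ⟨j, h1, h2, h3, h4, m, hm1, hm2, hm3⟩ := h
  exact ⟨j, h2, h3, m, hm2, i, by omega, le_refl _, hi1, hm3, h4⟩

lemma iLoop_spec (l : List Char) (i : Nat) (hi : i ≤ l.length ∨ 10 ≤ l.length) :
    (IPred l i → pvILoop l i = .ret "Yes") ∧
      (¬ IPred l i → 10 ≤ l.length → pvILoop l i = .fall) ∧
      (¬ IPred l i → l.length < 10 → pvILoop l i = .err) := by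
  fun_induction pvILoop l i
  case case1 i hi10 hnone =>
    rw [List.getElem?_eq_none_iff] at hnone
    refine ⟨?_, fun _ h10 => by omega, fun _ _ => rfl⟩
    rintro ⟨j, h1, h2, _⟩; omega
  case case2 i hi10 s hjl hi1 =>
    have hilen : i < l.length := List.getElem?_eq_some_iff.mp hi1 |>.1
    by_cases hJ : JPred l i (i + 1)
    · have hs : PvRes.ret s = PvRes.ret "Yes" := by
        rw [← hjl]; exact (jLoop_spec l i (i + 1) (Or.inl (by omega))).1 hJ
      have hI : IPred l i := jpred_ipred l i hi1 hJ
      exact ⟨fun _ => hs, fun hn => absurd hI hn, fun hn => absurd hI hn⟩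
    · rcases Nat.lt_or_ge l.length 10 with hlen | hlen
      · have := (jLoop_spec l i (i + 1) (Or.inl (by omega))).2.2 hJ hlen
        rw [hjl] at this; cases this
      · have := (jLoop_spec l i (i + 1) (Or.inl (by omega))).2.1 hJ hlen
        rw [hjl] at this; cases this
  case case3 i hi10 hjl hi1 =>
    have hilen : i < l.length := List.getElem?_eq_some_iff.mp hi1 |>.1
    have hJ : ¬ JPred l i (i + 1) := fun h => by
      have := (jLoop_spec l i (i + 1) (Or.inl (by omega))).1 h
      rw [hjl] at this; cases this
    have hlen : l.length < 10 := by
      by_contra h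
      have := (jLoop_spec l i (i + 1) (Or.inl (by omega))).2.1 hJ (by omega)
      rw [hjl] at this; cases this
    refine ⟨fun hI => absurd (ipred_jpred l i hI) hJ, fun _ h10 => by omega, fun _ _ => rfl⟩
  case case4 i hi10 hjl hi1 ih =>
    have hilen : i < l.length := List.getElem?_eq_some_iff.mp hi1 |>.1
    have hJ : ¬ JPred l i (i + 1) := fun h => by
      have := (jLoop_spec l i (i + 1) (Or.inl (by omega))).1 h
      rw [hjl] at this; cases this
    have key : IPred l i ↔ IPred l (i + 1) := by
      constructor
      · rintro ⟨j, h1, h2, k, h3, i', h4, h5, h6, h7, h8⟩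
        rcases Nat.eq_or_lt_of_le h5 with h | h
        · exact absurd (jpred_ipred l i hi1 ⟨j, by omega, h1, h2, h8, k, by omega, h3, h7⟩)
            (fun hI => hJ (ipred_jpred l i hI))
        · exact ⟨j, h1, h2, k, h3, i', h4, by omega, h6, h7, h8⟩
      · rintro ⟨j, h1, h2, k, h3, i', h4, h5, h6, h7, h8⟩
        exact ⟨j, h1, h2, k, h3, i', h4, by omega, h6, h7, h8⟩
    rw [key]; exact ih (Or.inl (by omega))
  case case5 i hi10 c hlc hne ih =>
    have hilen : i < l.length := List.getElem?_eq_some_iff.mp hlc |>.1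
    have key : IPred l i ↔ IPred l (i + 1) := by
      constructor
      · rintro ⟨j, h1, h2, k, h3, i', h4, h5, h6, h7, h8⟩
        rcases Nat.eq_or_lt_of_le h5 with h | h
        · subst h; rw [hlc] at h6; exact absurd (Option.some.inj h6) hne
        · exact ⟨j, h1, h2, k, h3, i', h4, by omega, h6, h7, h8⟩
      · rintro ⟨j, h1, h2, k, h3, i', h4, h5, h6, h7, h8⟩
        exact ⟨j, h1, h2, k, h3, i', h4, by omega, h6, h7, h8⟩
    rw [key]; exact ih (Or.inl (by omega))
  case case6 i hi10 =>
    refine ⟨?_, fun _ _ => rfl, fun _ hlen => by omega⟩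
    rintro ⟨j, h1, h2, k, h3, i', h4, h5, _⟩; omega


lemma T_get (l : List Char) (t : Nat) (ht : t < 9) :
    ((l.drop 1).take 9)[t]? = l[t + 1]? := by
  rw [List.getElem?_take_of_lt ht, List.getElem?_drop]
  congr 1; omega

lemma T_len (l : List Char) : ((l.drop 1).take 9).length = min 9 (l.length - 1) := by
  simp

lemma mem_drop_take (T : List Char) (a n : Nat) (x : Char) :
    x ∈ (T.drop a).take n ↔ ∃ m, a ≤ m ∧ m < a + n ∧ T[m]? = some x := by
  rw [List.mem_iff_getElem?]
  constructor
  · rintro ⟨i, hi⟩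
    rcases Nat.lt_or_ge i n with h | h
    · rw [List.getElem?_take_of_lt h, List.getElem?_drop] at hi
      exact ⟨a + i, by omega, by omega, hi⟩
    · rw [List.getElem?_take_eq_none h] at hi; cases hi
  · rintro ⟨m, h1, h2, h3⟩
    refine ⟨m - a, ?_⟩
    rw [List.getElem?_take_of_lt (by omega), List.getElem?_drop]
    rwa [show a + (m - a) = m by omega]

lemma contains_slice_iff (T : List Char) (p q : Nat) :
    (PySem.List.slice T (some ((p : Int) + 1)) (some (q : Int))).contains '0' = true
      ↔ ∃ m, p < m ∧ m < q ∧ T[m]? = some '0' := by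
  rw [List.contains_iff_mem,
    show ((p : Int) + 1) = (((p + 1 : Nat) : Int)) by push_cast; ring,
    PySem.List.slice_natCast, mem_drop_take]
  constructor
  · rintro ⟨m, h1, h2, h3⟩; exact ⟨m, by omega, by omega, h3⟩
  · rintro ⟨m, h1, h2, h3⟩; exact ⟨m, by omega, by omega, h3⟩

lemma index?_first (T : List Char) (p : Nat) (hp : PySem.List.index? T '1' = some p) :
    p < T.length ∧ T[p]? = some '1' ∧ ∀ t, t < p → T[t]? ≠ some '1' := by
  obtain ⟨hk, h1, h2⟩ := PySem.List.getElem_of_index?_eq_some hp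
  refine ⟨hk, by rw [List.getElem?_eq_getElem hk, h1], fun t ht hcon => ?_⟩
  have htl : t < T.length := by omega
  rw [List.getElem?_eq_getElem htl] at hcon
  exact h2 t ht (Option.some.inj hcon)

lemma index?_last (T : List Char) (r : Nat) (hr : PySem.List.index? T.reverse '1' = some r) :
    T.length - 1 - r < T.length ∧ T[T.length - 1 - r]? = some '1' ∧
      ∀ t, T.length - 1 - r < t → t < T.length → T[t]? ≠ some '1' := by
  obtain ⟨hk, h1, h2⟩ := PySem.List.getElem_of_index?_eq_some hr
  rw [List.length_reverse] at hk
  have hq : T.length - 1 - r < T.length := by omega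
  rw [List.getElem_reverse] at h1
  refine ⟨hq, ?_, fun t ht1 ht2 hcon => ?_⟩
  · rw [List.getElem?_eq_getElem hq]
    exact congrArg some h1
  · have hj : T.length - 1 - t < r := by omega
    have h3 := h2 (T.length - 1 - t) hj
    rw [List.getElem_reverse] at h3
    rw [List.getElem?_eq_getElem ht2] at hcon
    simp only [show T.length - 1 - (T.length - 1 - t) = t from by omega] at h3
    exact h3 (Option.some.inj hcon)


lemma drop_one_take_nine (l : List Char) (h : 10 ≤ l.length) :
    (l.drop 1).take 9 = [l[1], l[2], l[3], l[4], l[5], l[6], l[7], l[8], l[9]] := by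
  apply List.ext_getElem
  · simp; omega
  · intro i h1 h2
    simp only [List.length_take, List.length_drop] at h1
    simp only [List.getElem_take, List.getElem_drop]
    have h9 : i < 9 := by omega
    interval_cases i <;> rfl

lemma bits_eq (l : List Char) (h : 10 ≤ l.length) :
    pvBits l (PySem.List.pyRange 1 10 1) = some ((l.drop 1).take 9) := by
  rw [show PySem.List.pyRange 1 10 1 = ([1,2,3,4,5,6,7,8,9] : List Int) from by decide]
  rw [drop_one_take_nine l h]
  have c1 : 1 < l.length := by omega
  have c2 : 2 < l.length := by omega
  have c3 : 3 < l.length := by omega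
  have c4 : 4 < l.length := by omega
  have c5 : 5 < l.length := by omega
  have c6 : 6 < l.length := by omega
  have c7 : 7 < l.length := by omega
  have c8 : 8 < l.length := by omega
  have c9 : 9 < l.length := by omega
  simp [pvBits, PySem.List.pyGet?, PySem.List.pyIdx?, c1, c2, c3, c4, c5, c6, c7, c8, c9]
  rfl

lemma etrip_iff (l : List Char) :
    Etrip l ↔ ∃ c, c < ((l.drop 1).take 9).length ∧ ((l.drop 1).take 9)[c]? = some '1' ∧
      ∃ b, b < c ∧ ((l.drop 1).take 9)[b]? = some '0' ∧
        ∃ a, a < b ∧ ((l.drop 1).take 9)[a]? = some '1' := by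
  unfold Etrip
  constructor
  · rintro ⟨j, h1, h2, k, h3, i, h4, h5, h6, h7, h8⟩
    refine ⟨j - 1, by rw [T_len]; omega, ?_, k - 1, by omega, ?_, i - 1, by omega, ?_⟩
    · rw [T_get _ _ (by omega), show j - 1 + 1 = j by omega]; exact h8
    · rw [T_get _ _ (by omega), show k - 1 + 1 = k by omega]; exact h7
    · rw [T_get _ _ (by omega), show i - 1 + 1 = i by omega]; exact h6
  · rintro ⟨c, hc, h1, b, hb, h2, a, ha, h3⟩
    rw [T_len] at hc
    rw [T_get _ _ (by omega)] at h1
    rw [T_get _ _ (by omega)] at h2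
    rw [T_get _ _ (by omega)] at h3
    exact ⟨c + 1, by omega, by omega, b + 1, by omega, a + 1, by omega, by omega, h3, h2, h1⟩

lemma alt_char (S : String) (c : Char) (h0 : S.toList[0]? = some c) (hc : c ≠ '0')
    (h10 : 10 ≤ S.toList.length) :
    (Etrip S.toList → isSplit_alt S = "Yes") ∧ (¬ Etrip S.toList → isSplit_alt S = "No") := by
  simp only [isSplit_alt, h0, if_neg hc, bits_eq S.toList h10]
  by_cases hmem : '1' ∈ (S.toList.drop 1).take 9
  · have htrue : ((S.toList.drop 1).take 9).contains '1' = true :=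
      List.contains_iff_mem.mpr hmem
    obtain ⟨p, hp⟩ := Option.isSome_iff_exists.mp
      ((PySem.List.index?_isSome_iff _ _).mpr hmem)
    obtain ⟨r, hr⟩ := Option.isSome_iff_exists.mp
      ((PySem.List.index?_isSome_iff _ _).mpr (List.mem_reverse.mpr hmem))
    rw [if_neg (show ¬ (((S.toList.drop 1).take 9).contains '1' = false) from by
      rw [htrue]; decide)]
    simp only [hp, hr]
    have hfl := index?_first _ p hp
    have hll := index?_last _ r hr
    have hiff := contains_slice_iff ((S.toList.drop 1).take 9) p
      (((S.toList.drop 1).take 9).length - 1 - r)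
    have hEiff : Etrip S.toList ↔ ∃ m, p < m ∧ m < ((S.toList.drop 1).take 9).length - 1 - r ∧
        ((S.toList.drop 1).take 9)[m]? = some '0' := by
      rw [etrip_iff]
      constructor
      · rintro ⟨cI, h1, h2, b, h3, h4, a, h5, h6⟩
        have hpa : p ≤ a := by by_contra h; exact (hfl.2.2 a (by omega)) h6
        have hcq : cI ≤ ((S.toList.drop 1).take 9).length - 1 - r := by
          by_contra h; exact (hll.2.2 cI (by omega) h1) h2
        exact ⟨b, by omega, by omega, h4⟩
      · rintro ⟨m, h1, h2, h3⟩
        exact ⟨_, hll.1, hll.2.1, m, h2, h3, p, h1, hfl.2.1⟩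
    refine ⟨fun hE => ?_, fun hE => ?_⟩
    · rw [if_pos (hiff.mpr (hEiff.mp hE))]
    · rw [if_neg (fun h : (_ : Bool) = true => hE (hEiff.mpr (hiff.mp h)))]
  · have hfalse : ((S.toList.drop 1).take 9).contains '1' = false := by
      rw [Bool.eq_false_iff]
      exact fun h => hmem (List.contains_iff_mem.mp h)
    simp only [hfalse]
    refine ⟨fun hE => ?_, fun _ => rfl⟩
    obtain ⟨cI, h1, h2, _⟩ := (etrip_iff S.toList).mp hE
    exact absurd (List.mem_of_getElem? h2) hmem

-- ===== VERDICT (by name: the statement is the Claim_ definition above) =====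
theorem isSplit_spec : Claim_equal_isSplit := by
  intro S _ hPre
  unfold Spec_isSplit
  obtain ⟨hne, hdis⟩ := hPre
  have hlen1 : 0 < S.toList.length := List.length_pos_iff.mpr hne
  obtain ⟨c, h0⟩ : ∃ c, S.toList[0]? = some c := ⟨_, List.getElem?_eq_getElem hlen1⟩
  by_cases hc : c = '0'
  · subst hc; simp [isSplit, isSplit_alt, h0]
  · have h10 : 10 ≤ S.toList.length := by
      rcases hdis with h | h
      · rw [h0] at h; exact absurd (Option.some.inj h) hc
      · exact h
    have halt := alt_char S c h0 hc h10
    by_cases hE : Etrip S.toList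
    · have hI := (iLoop_spec S.toList 1 (Or.inl hlen1)).1 (etrip_eq_ipred _ ▸ hE)
      have hA : isSplit S = "Yes" := by simp [isSplit, h0, hc, hI]
      rw [hA, halt.1 hE]
    · have hI := (iLoop_spec S.toList 1 (Or.inl hlen1)).2.1
        (fun hip => hE (etrip_eq_ipred _ ▸ hip)) h10
      have hA : isSplit S = "No" := by simp [isSplit, h0, hc, hI]
      rw [hA, halt.2 hE]
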